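-- pv_equiv track=rewrite | github.com/gbtami/pychess-variants | server/alice_fen.py | fsf2py
-- ===== SOURCE A (Python) =====
-- def fsf2py(fenin):
--     s = fenin.strip().split(" ", 1)[0]
--     board = {}
--     board2 = {}
--     r = 8
--     f = 1
--     m = False
--     for c in s:
--         if c.isdigit():
--             f += int(c)
--         elif c.isalpha():
--             if m:
--                 board2[(f, r)] = c
--             else:
--                 board[(f, r)] = c
--             f += 1
--             m = False
--         elif c == "|":
--             m = True
--         elif c == "/":
--             r -= 1
--             f = 1
--
--     fen = ""
--     i = 0
--     for r in range(8, 0, -1):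
--         for f in range(1, 9):
--             if (f, r) in board:
--                 if i:
--                     fen += str(i)
--                     i = 0
--                 fen += board[(f, r)]
--             else:
--                 i += 1
--         if i:
--             fen += str(i)
--             i = 0
--         fen += "/" if r > 1 else " "
--     fen += fenin.split(" ", 1)[1] + "| "
--
--     i = 0
--     for r in range(8, 0, -1):
--         for f in range(1, 9):
--             if (f, r) in board2:
--                 if i:
--                     fen += str(i)
--                     i = 0
--                 fen += board2[(f, r)]
--             else:
--                 i += 1
--         if i:
--             fen += str(i)
--             i = 0
--         fen += "/" if r > 1 else " "
--     add = fenin.split(" ")[1:]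
--     add[1] = "-"
--     fen += " ".join(add)
--     return fen
-- ===== SOURCE B (Python) =====
-- def fsf2py(fenin):
--     s = fenin.strip().split(" ", 1)[0]
--     grid = [[None] * 8 for _ in range(8)]   # grid[r-1][f-1], rank r, file f
--     grid2 = [[None] * 8 for _ in range(8)]
--     r, f, m = 8, 1, False
--     for c in s:
--         if c.isdigit():
--             f += int(c)
--         elif c.isalpha():
--             if 1 <= f <= 8 and 1 <= r <= 8:
--                 (grid2 if m else grid)[r - 1][f - 1] = c
--             f += 1
--             m = False
--         elif c == "|":
--             m = True
--         elif c == "/":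
--             r -= 1
--             f = 1
--
--     def render_row(cells):
--         # run-length FEN of one rank: recurse on maximal runs of pieces / empties
--         if not cells:
--             return ""
--         k = cells[0] is not None
--         n = 1
--         while n < len(cells) and (cells[n] is not None) == k:
--             n += 1
--         return ("".join(cells[:n]) if k else str(n)) + render_row(cells[n:])
--
--     def render(g):
--         return "/".join(render_row(g[rr - 1]) for rr in range(8, 0, -1))
--
--     rest = fenin.split(" ", 1)[1]
--     add = fenin.split(" ")[1:]
--     add[1] = "-"
--     return render(grid) + " " + rest + "| " + render(grid2) + " " + " ".join(add)
-- ===== Notes on version B (the rewrite author's own statement) =====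
-- stated objective: alternative
-- what changed: B stores the parsed pieces in two 8x8 row-list grids instead of A's coordinate-keyed dicts, and renders each rank by recursing on its maximal runs of pieces or empties, joining the ranks with a separator, replacing A's nested range loops over dict membership with a mutable empty-square counter.
import Mathlib
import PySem

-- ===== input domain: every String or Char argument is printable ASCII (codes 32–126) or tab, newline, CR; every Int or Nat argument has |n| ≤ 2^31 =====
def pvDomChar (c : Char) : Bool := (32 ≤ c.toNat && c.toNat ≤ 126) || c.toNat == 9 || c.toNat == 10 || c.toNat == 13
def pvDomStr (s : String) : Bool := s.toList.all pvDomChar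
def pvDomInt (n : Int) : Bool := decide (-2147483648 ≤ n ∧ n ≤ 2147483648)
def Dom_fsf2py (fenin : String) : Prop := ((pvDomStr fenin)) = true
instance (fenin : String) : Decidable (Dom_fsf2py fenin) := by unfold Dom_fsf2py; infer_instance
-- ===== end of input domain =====

-- B rebuilds the two boards as 8x8 grids and renders each rank by recursing on maximal
-- runs of pieces or empties instead of A's dicts plus a mutable empty-counter (objective: alternative).

-- ===== PORT A =====

-- one character of the parse loop; state = (board, board2, r, f, m)
def stepA (st : PySem.Dict (Int × Int) Char × PySem.Dict (Int × Int) Char × Int × Int × Bool)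
    (c : Char) : PySem.Dict (Int × Int) Char × PySem.Dict (Int × Int) Char × Int × Int × Bool :=
  match st with
  | (board, board2, r, f, m) =>
    if PySem.Chars.isdigit c then
      -- int(c): guarded by isdigit, so ofStr? is some; getD 0 is exact here
      (board, board2, r, f + (PySem.Int.ofStr? (String.ofList [c])).getD 0, m)
    else if PySem.Chars.isalpha c then
      if m then (board, board2.insert (f, r) c, r, f + 1, false)
      else (board.insert (f, r) c, board2, r, f + 1, false)
    else if c = '|' then (board, board2, r, f, true)
    else if c = '/' then (board, board2, r - 1, 1, m)
    else st

-- body of 'for f in range(1, 9)': the '(f, r) in board' test plus access, acc = (fen, i)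
def cellStepA (acc : String × Int) (oc : Option Char) : String × Int :=
  match oc with
  | some c => ((if acc.2 ≠ 0 then acc.1 ++ PySem.Int.toStr acc.2 else acc.1) ++ String.ofList [c], 0)
  | none => (acc.1, acc.2 + 1)

-- body of 'for r in range(8, 0, -1)'
def rankStepA (board : PySem.Dict (Int × Int) Char) (acc : String × Int) (r : Int) : String × Int :=
  let a := (PySem.List.pyRange 1 9 1).foldl (fun ac f => cellStepA ac (board.get? (f, r))) acc
  let fen := if a.2 ≠ 0 then a.1 ++ PySem.Int.toStr a.2 else a.1
  (if r > 1 then fen ++ "/" else fen ++ " ", 0)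

def renderA (board : PySem.Dict (Int × Int) Char) (fen0 : String) : String :=
  ((PySem.List.pyRange 8 0 (-1)).foldl (rankStepA board) (fen0, 0)).1

def fsf2py (fenin : String) : String :=
  let s := ((PySem.Str.splitMax? (PySem.Str.strip fenin) " " 1).getD []).getD 0 ""
  let st := s.toList.foldl stepA (PySem.Dict.empty, PySem.Dict.empty, 8, 1, false)
  let fen := renderA st.1 ""
  -- second field of fenin split once on a space: IndexError when fenin has no space, excluded by Pre_
  let fen := fen ++ ((PySem.Str.splitMax? fenin " " 1).getD []).getD 1 "" ++ "| "
  let fen := renderA st.2.1 fen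
  let add := ((PySem.Str.split? fenin " ").getD []).drop 1
  -- the assignment to add at index 1: IndexError when add has under 2 entries, excluded by Pre_
  let add := add.set 1 "-"
  fen ++ PySem.Str.join " " add

-- ===== PORT B =====

def emptyGrid : List (List (Option Char)) := List.replicate 8 (List.replicate 8 none)

-- (grid2 if m else grid)[r - 1][f - 1] = c, guarded by 1<=f<=8 and 1<=r<=8
def setCell (g : List (List (Option Char))) (f r : Int) (c : Char) : List (List (Option Char)) :=
  if 1 ≤ f ∧ f ≤ 8 ∧ 1 ≤ r ∧ r ≤ 8 then
    g.set (r - 1).toNat ((g.getD (r - 1).toNat []).set (f - 1).toNat (some c))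
  else g

def stepB (st : List (List (Option Char)) × List (List (Option Char)) × Int × Int × Bool)
    (c : Char) : List (List (Option Char)) × List (List (Option Char)) × Int × Int × Bool :=
  match st with
  | (g, g2, r, f, m) =>
    if PySem.Chars.isdigit c then
      (g, g2, r, f + (PySem.Int.ofStr? (String.ofList [c])).getD 0, m)
    else if PySem.Chars.isalpha c then
      if m then (g, setCell g2 f r c, r, f + 1, false)
      else (setCell g f r c, g2, r, f + 1, false)
    else if c = '|' then (g, g2, r, f, true)
    else if c = '/' then (g, g2, r - 1, 1, m)
    else st

-- render_row: recursion on the maximal leading run of pieces / empties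
def renderRow : List (Option Char) → String
  | [] => ""
  | c :: t =>
    (if c.isSome then String.ofList ((c :: t.takeWhile fun x => x.isSome == c.isSome).filterMap id)
     else PySem.Int.toStr ((1 + (t.takeWhile fun x => x.isSome == c.isSome).length : Nat) : Int)) ++
    renderRow (t.dropWhile fun x => x.isSome == c.isSome)
  termination_by l => l.length
  decreasing_by simp only [List.length_cons]; exact Nat.lt_succ_of_le (List.length_dropWhile_le _ t)

def renderB (g : List (List (Option Char))) : String :=
  PySem.Str.join "/" ((PySem.List.pyRange 8 0 (-1)).map fun r => renderRow (g.getD (r - 1).toNat []))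

def fsf2py_alt (fenin : String) : String :=
  let s := ((PySem.Str.splitMax? (PySem.Str.strip fenin) " " 1).getD []).getD 0 ""
  let st := s.toList.foldl stepB (emptyGrid, emptyGrid, 8, 1, false)
  -- the second split field and the assignment to add at index 1 raise unless fenin has at least three fields, excluded by Pre_
  let rest := ((PySem.Str.splitMax? fenin " " 1).getD []).getD 1 ""
  let add := (((PySem.Str.split? fenin " ").getD []).drop 1).set 1 "-"
  renderB st.1 ++ " " ++ rest ++ "| " ++ renderB st.2.1 ++ " " ++ PySem.Str.join " " add

-- ===== PRECONDITION & SPEC =====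

-- Pre_ excludes exactly the inputs with fewer than three space-separated fields, on which the
-- Python A raises IndexError (reading the second split field, or assigning into add at index 1).
def Pre_fsf2py (fenin : String) : Prop := 3 ≤ ((PySem.Str.split? fenin " ").getD []).length
instance (fenin : String) : Decidable (Pre_fsf2py fenin) := by unfold Pre_fsf2py; infer_instance

def pvWitness_fsf2py : String := "8/8/8/8/rnbqk|R2N w - - 0 1"

def Spec_fsf2py (fenin : String) (out : String) : Prop := out = fsf2py_alt fenin
instance (fenin : String) (out : String) : Decidable (Spec_fsf2py fenin out) := by unfold Spec_fsf2py; infer_instance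

-- ===== CLAIM (what is proved, stated in full; the proofs are below) =====
def Claim_equal_fsf2py : Prop := ∀ (fenin : String), Dom_fsf2py fenin → Pre_fsf2py fenin → Spec_fsf2py fenin (fsf2py fenin)

-- ===== LEMMAS AND PROOFS =====

-- BGRel: relation between A's dict board and B's grid
def BGRel (b : PySem.Dict (Int × Int) Char) (g : List (List (Option Char))) : Prop :=
  g.length = 8 ∧ (∀ row ∈ g, row.length = 8) ∧
  ∀ f r : Int, 1 ≤ f → f ≤ 8 → 1 ≤ r → r ≤ 8 →
    b.get? (f, r) = (g.getD (r - 1).toNat []).getD (f - 1).toNat none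

theorem rel_empty : BGRel PySem.Dict.empty emptyGrid := by
  refine ⟨by simp [emptyGrid], ?_, ?_⟩
  · intro row h
    rw [List.eq_of_mem_replicate h]
    simp
  · intro f r _ hf8 _ hr8
    have hi : (r - 1).toNat < 8 := by omega
    have hj : (f - 1).toNat < 8 := by omega
    rw [PySem.Dict.get?_empty, emptyGrid, List.getD_replicate _ hi, List.getD_replicate _ hj]

theorem rel_insert {b : PySem.Dict (Int × Int) Char} {g : List (List (Option Char))}
    (h : BGRel b g) (f r : Int) (c : Char) : BGRel (b.insert (f, r) c) (setCell g f r c) := by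
  obtain ⟨hlen, hrows, hget⟩ := h
  by_cases hin : 1 ≤ f ∧ f ≤ 8 ∧ 1 ≤ r ∧ r ≤ 8
  · obtain ⟨hf1, hf8, hr1, hr8⟩ := hin
    have hi : (r - 1).toNat < 8 := by omega
    have hj : (f - 1).toNat < 8 := by omega
    have hrowmem : g.getD (r - 1).toNat [] ∈ g := by
      rw [List.getD_eq_getElem g [] (by omega)]
      exact List.getElem_mem _
    have hrowlen : (g.getD (r - 1).toNat []).length = 8 := hrows _ hrowmem
    rw [setCell, if_pos ⟨hf1, hf8, hr1, hr8⟩]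
    refine ⟨by rw [List.length_set]; exact hlen, ?_, ?_⟩
    · intro row hmem
      rcases List.mem_or_eq_of_mem_set hmem with hm | hm
      · exact hrows _ hm
      · rw [hm, List.length_set]; exact hrowlen
    · intro f' r' hf1' hf8' hr1' hr8'
      rw [PySem.Dict.get?_insert]
      simp only [Prod.mk.injEq]
      have houter : (g.set (r - 1).toNat ((g.getD (r - 1).toNat []).set (f - 1).toNat (some c))).getD (r' - 1).toNat [] =
          if (r - 1).toNat = (r' - 1).toNat then (g.getD (r - 1).toNat []).set (f - 1).toNat (some c)
          else g.getD (r' - 1).toNat [] := by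
        rw [List.getD_eq_getElem?_getD, List.getElem?_set]
        split_ifs with h1 h2
        · rfl
        · omega
        · exact (List.getD_eq_getElem?_getD).symm
      rw [houter]
      by_cases hrr : r' = r
      · subst hrr
        rw [if_pos rfl, List.getD_eq_getElem?_getD, List.getElem?_set]
        by_cases hff : f' = f
        · subst hff
          have hlt : (f' - 1).toNat < (g.getD (r' - 1).toNat []).length := by omega
          rw [List.getD_eq_getElem?_getD, show (r' - 1).toNat = r'.toNat - 1 from by omega,
            show (f' - 1).toNat = f'.toNat - 1 from by omega] at hlt
          simp [hlt]
        · rw [if_neg (show ¬((f - 1).toNat = (f' - 1).toNat) by omega),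
            if_neg (show ¬(f' = f ∧ r' = r') by simp [hff]), ← List.getD_eq_getElem?_getD]
          exact hget f' r' hf1' hf8' hr1' hr8'
      · rw [if_neg (show ¬((r - 1).toNat = (r' - 1).toNat) by omega),
          if_neg (show ¬(f' = f ∧ r' = r) by simp [hrr])]
        exact hget f' r' hf1' hf8' hr1' hr8'
  · rw [setCell, if_neg hin]
    refine ⟨hlen, hrows, ?_⟩
    intro f' r' hf1' hf8' hr1' hr8'
    rw [PySem.Dict.get?_insert_of_ne]
    · exact hget f' r' hf1' hf8' hr1' hr8'
    · intro hc
      injection hc with e1 e2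
      subst e1; subst e2
      exact hin ⟨hf1', hf8', hr1', hr8'⟩

theorem fold_rel (cs : List Char) :
    ∀ (bA bA2 : PySem.Dict (Int × Int) Char) (g g2 : List (List (Option Char)))
      (r f : Int) (m : Bool), BGRel bA g → BGRel bA2 g2 →
      BGRel (cs.foldl stepA (bA, bA2, r, f, m)).1 (cs.foldl stepB (g, g2, r, f, m)).1 ∧
      BGRel (cs.foldl stepA (bA, bA2, r, f, m)).2.1 (cs.foldl stepB (g, g2, r, f, m)).2.1 := by
  induction cs with
  | nil => intro bA bA2 g g2 r f m h1 h2; exact ⟨h1, h2⟩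
  | cons c t ih =>
    intro bA bA2 g g2 r f m h1 h2
    simp only [List.foldl_cons, stepA, stepB]
    split_ifs with hd ha hm hp hs
    · exact ih _ _ _ _ _ _ _ h1 h2
    · exact ih _ _ _ _ _ _ _ h1 (rel_insert h2 f r c)
    · exact ih _ _ _ _ _ _ _ (rel_insert h1 f r c) h2
    · exact ih _ _ _ _ _ _ _ h1 h2
    · exact ih _ _ _ _ _ _ _ h1 h2
    · exact ih _ _ _ _ _ _ _ h1 h2

-- A's counter loop over one rank as a pure function: (emitted string, pending empty count)
def arow : List (Option Char) → Nat → String × Nat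
  | [], n => ("", n)
  | none :: t, n => arow t (n + 1)
  | some c :: t, n =>
      ((if n ≠ 0 then PySem.Int.toStr (n : Int) else "") ++ (String.ofList [c] ++ (arow t 0).1),
       (arow t 0).2)

theorem foldl_cellStepA (cells : List (Option Char)) :
    ∀ (fen : String) (n : Nat),
      cells.foldl cellStepA (fen, (n : Int)) = (fen ++ (arow cells n).1, ((arow cells n).2 : Int)) := by
  induction cells with
  | nil => intro fen n; simp [arow]
  | cons hd t ih =>
    intro fen n
    cases hd with
    | none =>
      simp only [List.foldl_cons, cellStepA, arow]
      rw [show ((n : Int) + 1) = ((n + 1 : Nat) : Int) by push_cast; ring]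
      exact ih fen (n + 1)
    | some c =>
      simp only [List.foldl_cons, cellStepA, arow]
      have h2 := ih ((if (n : Int) ≠ 0 then fen ++ PySem.Int.toStr (n : Int) else fen) ++ String.ofList [c]) 0
      rw [Nat.cast_zero] at h2
      rw [h2]
      simp only [ne_eq, Int.natCast_eq_zero]
      split_ifs with h
      · simp [String.append_assoc]
      · simp [String.append_assoc]

theorem foldl_cellStepA0 (cells : List (Option Char)) (fen : String) :
    cells.foldl cellStepA (fen, (0 : Int)) = (fen ++ (arow cells 0).1, ((arow cells 0).2 : Int)) := by
  have := foldl_cellStepA cells fen 0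
  simpa using this

def afterRow (p : String × Nat) : String :=
  p.1 ++ (if p.2 ≠ 0 then PySem.Int.toStr (p.2 : Int) else "")

theorem renderRow_some (c : Char) (t : List (Option Char)) :
    renderRow (some c :: t) = String.ofList [c] ++ renderRow t := by
  cases t with
  | nil => simp [renderRow]
  | cons d t' =>
    cases d with
    | none => simp [renderRow]
    | some e =>
      rw [renderRow, renderRow]
      simp only [Option.isSome_some, beq_self_eq_true, if_true, List.takeWhile_cons,
        List.dropWhile_cons, List.filterMap_cons, id]
      apply String.toList_inj.mp
      simp [String.toList_append]

theorem renderRow_replicate (n : Nat) (h : 0 < n) :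
    renderRow (List.replicate n none) = PySem.Int.toStr (n : Int) := by
  obtain ⟨m, rfl⟩ := Nat.exists_eq_succ_of_ne_zero (Nat.pos_iff_ne_zero.mp h)
  rw [List.replicate_succ, renderRow]
  simp [renderRow, Nat.add_comm]

theorem renderRow_rep_some (n : Nat) (c : Char) (t : List (Option Char)) (h : 0 < n) :
    renderRow (List.replicate n none ++ some c :: t) =
      PySem.Int.toStr (n : Int) ++ renderRow (some c :: t) := by
  obtain ⟨m, rfl⟩ := Nat.exists_eq_succ_of_ne_zero (Nat.pos_iff_ne_zero.mp h)
  rw [List.replicate_succ, List.cons_append, renderRow]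
  simp [Nat.add_comm]

theorem row_main (cells : List (Option Char)) :
    ∀ n : Nat, afterRow (arow cells n) = renderRow (List.replicate n none ++ cells) := by
  induction cells with
  | nil =>
    intro n
    cases n with
    | zero => simp [arow, afterRow, renderRow]
    | succ m =>
      rw [List.append_nil, renderRow_replicate _ (Nat.succ_pos m)]
      simp [arow, afterRow]
  | cons hd t ih =>
    intro n
    cases hd with
    | none =>
      show afterRow (arow t (n + 1)) = _
      rw [ih (n + 1), List.replicate_succ', List.append_assoc, List.singleton_append]
    | some c =>
      have hfull : afterRow (arow (some c :: t) n) =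
          (if n ≠ 0 then PySem.Int.toStr (n : Int) else "") ++
            (String.ofList [c] ++ afterRow (arow t 0)) := by
        simp [arow, afterRow, String.append_assoc]
      rw [hfull, ih 0]
      simp only [List.replicate_zero, List.nil_append]
      cases n with
      | zero =>
        simp only [List.replicate_zero, List.nil_append]
        rw [renderRow_some]
        simp
      | succ m =>
        rw [renderRow_rep_some _ c t (Nat.succ_pos m), renderRow_some]
        simp

theorem list8_expand (row : List (Option Char)) (h : row.length = 8) :
    [row.getD 0 none, row.getD 1 none, row.getD 2 none, row.getD 3 none,
     row.getD 4 none, row.getD 5 none, row.getD 6 none, row.getD 7 none] = row := by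
  obtain _ | ⟨a0, row⟩ := row; · simp at h
  obtain _ | ⟨a1, row⟩ := row; · simp at h
  obtain _ | ⟨a2, row⟩ := row; · simp at h
  obtain _ | ⟨a3, row⟩ := row; · simp at h
  obtain _ | ⟨a4, row⟩ := row; · simp at h
  obtain _ | ⟨a5, row⟩ := row; · simp at h
  obtain _ | ⟨a6, row⟩ := row; · simp at h
  obtain _ | ⟨a7, row⟩ := row; · simp at h
  obtain rfl : row = [] := by
    apply List.eq_nil_of_length_eq_zero
    simp only [List.length_cons] at h
    omega
  rfl

theorem rank_eq {b : PySem.Dict (Int × Int) Char} {g : List (List (Option Char))}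
    (h : BGRel b g) (r : Int) (hr1 : 1 ≤ r) (hr8 : r ≤ 8) (fen : String) :
    rankStepA b (fen, 0) r =
      (fen ++ (renderRow (g.getD (r - 1).toNat []) ++ (if r > 1 then "/" else " ")), 0) := by
  obtain ⟨hlen, hrows, hget⟩ := h
  have hrowmem : g.getD (r - 1).toNat [] ∈ g := by
    rw [List.getD_eq_getElem g [] (by omega)]
    exact List.getElem_mem _
  have hrowlen : (g.getD (r - 1).toNat []).length = 8 := hrows _ hrowmem
  rw [rankStepA]
  rw [show PySem.List.pyRange 1 9 1 = [1, 2, 3, 4, 5, 6, 7, 8] from by decide]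
  rw [show (([1, 2, 3, 4, 5, 6, 7, 8] : List Int).foldl (fun ac f => cellStepA ac (b.get? (f, r))) (fen, 0)) =
      (([1, 2, 3, 4, 5, 6, 7, 8] : List Int).map (fun f => b.get? (f, r))).foldl cellStepA (fen, 0) from
    (List.foldl_map).symm]
  simp only [List.map_cons, List.map_nil]
  rw [hget 1 r (by norm_num) (by norm_num) hr1 hr8, hget 2 r (by norm_num) (by norm_num) hr1 hr8,
    hget 3 r (by norm_num) (by norm_num) hr1 hr8, hget 4 r (by norm_num) (by norm_num) hr1 hr8,
    hget 5 r (by norm_num) (by norm_num) hr1 hr8, hget 6 r (by norm_num) (by norm_num) hr1 hr8,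
    hget 7 r (by norm_num) (by norm_num) hr1 hr8, hget 8 r (by norm_num) (by norm_num) hr1 hr8]
  simp only [show ((1 : Int) - 1).toNat = 0 from by decide, show ((2 : Int) - 1).toNat = 1 from by decide,
    show ((3 : Int) - 1).toNat = 2 from by decide, show ((4 : Int) - 1).toNat = 3 from by decide,
    show ((5 : Int) - 1).toNat = 4 from by decide, show ((6 : Int) - 1).toNat = 5 from by decide,
    show ((7 : Int) - 1).toNat = 6 from by decide, show ((8 : Int) - 1).toNat = 7 from by decide]
  rw [list8_expand _ hrowlen, foldl_cellStepA0]
  have hrm := row_main (g.getD (r - 1).toNat []) 0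
  simp only [List.replicate_zero, List.nil_append] at hrm
  rw [← hrm, afterRow]
  simp only [ne_eq, Int.natCast_eq_zero]
  split_ifs with h1 h2 h3 <;> simp_all [String.append_assoc, String.append_empty]

theorem str_join_singleton (sep a : String) : PySem.Str.join sep [a] = a := by
  rw [PySem.Str.join]
  simp only [List.map_cons, List.map_nil, PySem.Chars.join_singleton, String.ofList_toList]

theorem str_join_cons (sep a b : String) (l : List String) :
    PySem.Str.join sep (a :: b :: l) = a ++ (sep ++ PySem.Str.join sep (b :: l)) := by
  rw [PySem.Str.join, PySem.Str.join]
  simp only [List.map_cons, PySem.Chars.join_cons_cons, String.ofList_append,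
    String.ofList_toList, String.append_assoc]

theorem renderA_eq {b : PySem.Dict (Int × Int) Char} {g : List (List (Option Char))}
    (h : BGRel b g) (fen0 : String) : renderA b fen0 = fen0 ++ (renderB g ++ " ") := by
  rw [renderA, renderB]
  rw [show PySem.List.pyRange 8 0 (-1) = [8, 7, 6, 5, 4, 3, 2, 1] from by decide]
  simp only [List.foldl_cons, List.foldl_nil, List.map_cons, List.map_nil]
  rw [rank_eq h 8 (by norm_num) (by norm_num), rank_eq h 7 (by norm_num) (by norm_num),
    rank_eq h 6 (by norm_num) (by norm_num), rank_eq h 5 (by norm_num) (by norm_num),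
    rank_eq h 4 (by norm_num) (by norm_num), rank_eq h 3 (by norm_num) (by norm_num),
    rank_eq h 2 (by norm_num) (by norm_num), rank_eq h 1 (by norm_num) (by norm_num)]
  norm_num
  rw [str_join_cons, str_join_cons, str_join_cons, str_join_cons, str_join_cons,
    str_join_cons, str_join_cons, str_join_singleton]
  simp [String.append_assoc]

-- ===== VERDICT (by name: the statement is the Claim_ definition above) =====
theorem fsf2py_spec : Claim_equal_fsf2py := by
  intro fenin _ _
  show fsf2py fenin = fsf2py_alt fenin
  rw [fsf2py, fsf2py_alt]
  obtain ⟨hA, hB⟩ :=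
    fold_rel ((((PySem.Str.splitMax? (PySem.Str.strip fenin) " " 1).getD []).getD 0 "").toList)
      PySem.Dict.empty PySem.Dict.empty emptyGrid emptyGrid 8 1 false rel_empty rel_empty
  rw [renderA_eq hA, renderA_eq hB]
  simp [String.append_assoc]
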